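-- pv_equiv track=rewrite | github.com/mbaddar1/coding_exercises | delivery_hero_interview/problem3.py | solution
-- ===== SOURCE A (Python) =====
-- def solution(A):
--     # write your code in Python 3.6
--     sorted_A = sorted(A)
--     N = len(A)
--     if N < 3:
--         return 0
--     for Q in range(1, N - 1):
--         P = Q - 1
--         R = Q + 1
--         valid_lengths = (sorted_A[P] > 0) and (sorted_A[Q] > 0) and (sorted_A[R] > 0)
--         if valid_lengths and (sorted_A[P] + sorted_A[Q] > sorted_A[R]):
--             return 1
--     return 0
-- ===== SOURCE B (Python) =====
-- def solution(A):
--     pool = [x for x in A if x > 0]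
--     a = b = None
--     while pool:
--         m = min(pool)
--         pool.remove(m)
--         if a is not None and a + b > m:
--             return 1
--         a, b = b, m
--     return 0
-- ===== Notes on version B (the rewrite author's own statement) =====
-- stated objective: faster
-- what changed: B never calls sorted(): it filters the positive values into a pool and repeatedly extracts the minimum destructively (min + remove), carrying only the last two extracted values in registers and returning 1 at the first triple that violates the triangle bound; A sorts the whole array and scans adjacent index triples with a positivity guard.
import Mathlib
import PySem

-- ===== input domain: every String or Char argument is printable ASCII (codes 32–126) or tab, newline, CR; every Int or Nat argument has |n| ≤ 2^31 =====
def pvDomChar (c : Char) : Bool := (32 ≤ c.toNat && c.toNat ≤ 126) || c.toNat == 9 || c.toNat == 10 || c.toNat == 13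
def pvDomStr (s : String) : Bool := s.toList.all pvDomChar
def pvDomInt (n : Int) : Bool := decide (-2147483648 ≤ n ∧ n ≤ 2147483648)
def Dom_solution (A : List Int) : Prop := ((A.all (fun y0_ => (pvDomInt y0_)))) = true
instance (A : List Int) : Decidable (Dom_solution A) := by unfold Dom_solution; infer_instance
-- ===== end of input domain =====

-- B replaces sort-then-scan by repeated destructive minimum extraction from the pool of
-- positive values, carrying the last two extracted values and exiting on the first
-- violating triple (measured faster in a timing run: early exit, no full sort).


-- ===== PORT A =====
-- loop 'for Q in range(1, N-1): … return 1 … / return 0' (indices always in range)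
def solGoA (s : List Int) : List Int → Int
  | [] => 0
  | q :: rest =>
    let P := q - 1
    let R := q + 1
    let valid_lengths := decide (PySem.List.pyGetD s P 0 > 0) && decide (PySem.List.pyGetD s q 0 > 0) && decide (PySem.List.pyGetD s R 0 > 0)
    if valid_lengths && decide (PySem.List.pyGetD s P 0 + PySem.List.pyGetD s q 0 > PySem.List.pyGetD s R 0) then 1
    else solGoA s rest

def solution (A : List Int) : Int :=
  let sorted_A := PySem.List.sorted A (fun x => x)
  let N : Int := A.length
  if N < 3 then 0
  else solGoA sorted_A (PySem.List.pyRange 1 (N - 1))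

-- ===== PORT B =====
-- 'while pool: m = min(pool); pool.remove(m); if a is not None and a + b > m: return 1; a, b = b, m'
-- (Python's 'a is not None' implies b is not None here, since a is assigned after b;
--  the (some, none) register state is unreachable and falls into the continue branch)
def solLoop (pool : List Int) (a b : Option Int) : Int :=
  match hm : PySem.List.min? pool (fun x => x) with
  | none => 0
  | some m =>
    match hr : PySem.List.remove? pool m with
    | none => 0    -- unreachable: min(pool) is a member of pool
    | some pool' =>
      match a, b with
      | some av, some bv =>
          if av + bv > m then 1 else solLoop pool' b (some m)
      | _, _ => solLoop pool' b (some m)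
termination_by pool.length
decreasing_by all_goals
  · have hmem : m ∈ pool := PySem.List.min?_mem hm
    rw [PySem.List.remove?_eq_some_erase pool m hmem] at hr
    cases hr
    have := List.length_erase_of_mem hmem
    have hp : 0 < pool.length := List.length_pos_of_mem hmem
    omega

def solution_alt (A : List Int) : Int :=
  solLoop (A.filter (fun x => decide (0 < x))) none none

-- ===== PRECONDITION & SPEC =====
def Spec_solution (A : List Int) (out : Int) : Prop := out = solution_alt A
instance (A : List Int) (out : Int) : Decidable (Spec_solution A out) := by unfold Spec_solution; infer_instance

-- ===== CLAIM (what is proved, stated in full; the proofs are below) =====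
def Claim_equal_solution : Prop := ∀ (A : List Int), Dom_solution A → Spec_solution A (solution A)

-- ===== LEMMAS AND PROOFS =====

-- the window scan over an already ordered list of extracted values
def winScan : Option Int → Option Int → List Int → Int
  | _, _, [] => 0
  | a, b, m :: rest =>
    match a, b with
    | some av, some bv => if av + bv > m then 1 else winScan b (some m) rest
    | _, _ => winScan b (some m) rest

-- structural 'some adjacent triple a,b,c has a + b > c'
def anyT : List Int → Bool
  | a :: b :: c :: r => decide (a + b > c) || anyT (b :: c :: r)
  | _ => false

theorem solGoA_eq_any (s : List Int) (l : List Int) :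
    solGoA s l = (if l.any (fun q =>
      (decide (PySem.List.pyGetD s (q - 1) 0 > 0) && decide (PySem.List.pyGetD s q 0 > 0) && decide (PySem.List.pyGetD s (q + 1) 0 > 0)) &&
        decide (PySem.List.pyGetD s (q - 1) 0 + PySem.List.pyGetD s q 0 > PySem.List.pyGetD s (q + 1) 0)) then 1 else 0) := by
  induction l with
  | nil => simp [solGoA]
  | cons q rest ih =>
    simp only [solGoA, List.any_cons, ih]
    by_cases h1 : PySem.List.pyGetD s (q - 1) 0 > 0 <;>
      by_cases h2 : PySem.List.pyGetD s q 0 > 0 <;>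
        by_cases h3 : PySem.List.pyGetD s (q + 1) 0 > 0 <;>
          by_cases h4 : PySem.List.pyGetD s (q - 1) 0 + PySem.List.pyGetD s q 0 > PySem.List.pyGetD s (q + 1) 0 <;>
            simp [h1, h2, h3, h4]

-- a (≤)-sorted list is its nonpositive part followed by its positive part
theorem sorted_split (s : List Int) (hs : s.Pairwise (· ≤ ·)) :
    s = s.filter (fun x => decide (x ≤ 0)) ++ s.filter (fun x => decide (0 < x)) := by
  induction s with
  | nil => simp
  | cons x t ih =>
    rcases List.pairwise_cons.mp hs with ⟨hx, ht⟩
    by_cases h : x ≤ 0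
    · simpa [List.filter_cons, h, not_lt.mpr h] using ih ht
    · push Not at h
      have h1 : t.filter (fun x => decide (x ≤ 0)) = [] := by
        rw [List.filter_eq_nil_iff]
        intro y hy
        simpa using lt_of_lt_of_le h (hx y hy)
      have h2 : t.filter (fun x => decide (0 < x)) = t := by
        rw [List.filter_eq_self]
        intro y hy
        simpa using lt_of_lt_of_le h (hx y hy)
      simp [h, not_le.mpr h, h1, h2]

theorem pyGetD_append_right (c p : List Int) (i : Int) (h0 : (c.length : Int) ≤ i)
    (h1 : i < (c.length : Int) + (p.length : Int)) :
    PySem.List.pyGetD (c ++ p) i 0 = PySem.List.pyGetD p (i - (c.length : Int)) 0 := by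
  rw [PySem.List.pyGetD_eq_getElem (c ++ p) 0 (by omega) (by simp; omega),
      PySem.List.pyGetD_eq_getElem p 0 (by omega) (by omega)]
  rw [List.getElem_append_right (by omega)]
  congr 1
  omega

theorem getD_pos_index (c p : List Int) (hc : ∀ x ∈ c, x ≤ 0) (i : Int) (h0 : 0 ≤ i)
    (h1 : i < (c.length : Int) + (p.length : Int))
    (hpos : 0 < PySem.List.pyGetD (c ++ p) i 0) : (c.length : Int) ≤ i := by
  by_contra h
  push Not at h
  rw [PySem.List.pyGetD_eq_getElem (c ++ p) 0 (by omega) (by simp; omega)] at hpos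
  rw [List.getElem_append_left (by omega)] at hpos
  exact absurd hpos (not_lt.mpr (hc _ (List.getElem_mem _)))

theorem mem_getD (p : List Int) (i : Int) (h0 : 0 ≤ i) (h1 : i < (p.length : Int)) :
    PySem.List.pyGetD p i 0 ∈ p := by
  rw [PySem.List.pyGetD_eq_getElem p 0 h0 h1]
  exact List.getElem_mem _

theorem any_equiv (c p : List Int) (hc : ∀ x ∈ c, x ≤ 0) (hp : ∀ x ∈ p, 0 < x) :
    (PySem.List.pyRange 1 ((c.length : Int) + (p.length : Int) - 1)).any (fun q =>
      (decide (PySem.List.pyGetD (c ++ p) (q - 1) 0 > 0) && decide (PySem.List.pyGetD (c ++ p) q 0 > 0) && decide (PySem.List.pyGetD (c ++ p) (q + 1) 0 > 0)) &&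
        decide (PySem.List.pyGetD (c ++ p) (q - 1) 0 + PySem.List.pyGetD (c ++ p) q 0 > PySem.List.pyGetD (c ++ p) (q + 1) 0))
    = (PySem.List.pyRange 2 ((p.length : Int))).any (fun i =>
      decide (PySem.List.pyGetD p (i - 2) 0 + PySem.List.pyGetD p (i - 1) 0 > PySem.List.pyGetD p i 0)) := by
  rw [Bool.eq_iff_iff]
  simp only [List.any_eq_true, PySem.List.mem_pyRange_one, Bool.and_eq_true, decide_eq_true_eq]
  constructor
  · rintro ⟨q, ⟨hq1, hq2⟩, ⟨⟨hP, hQ⟩, hR⟩, hsum⟩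
    have hk : (c.length : Int) ≤ q - 1 :=
      getD_pos_index c p hc (q - 1) (by omega) (by omega) hP
    refine ⟨q + 1 - (c.length : Int), ⟨by omega, by omega⟩, ?_⟩
    have e1 := pyGetD_append_right c p (q - 1) (by omega) (by omega)
    have e2 := pyGetD_append_right c p q (by omega) (by omega)
    have e3 := pyGetD_append_right c p (q + 1) (by omega) (by omega)
    rw [e1, e2, e3] at hsum
    have a1 : q - 1 - (c.length : Int) = q + 1 - (c.length : Int) - 2 := by omega
    have a2 : q - (c.length : Int) = q + 1 - (c.length : Int) - 1 := by omega
    rw [a1, a2] at hsum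
    exact hsum
  · rintro ⟨i, ⟨hi1, hi2⟩, hsum⟩
    refine ⟨(c.length : Int) + i - 1, ⟨by omega, by omega⟩, ⟨⟨?_, ?_⟩, ?_⟩, ?_⟩
    · rw [pyGetD_append_right c p _ (by omega) (by omega)]
      refine hp _ (mem_getD p _ (by omega) (by omega))
    · rw [pyGetD_append_right c p _ (by omega) (by omega)]
      refine hp _ (mem_getD p _ (by omega) (by omega))
    · rw [pyGetD_append_right c p _ (by omega) (by omega)]
      refine hp _ (mem_getD p _ (by omega) (by omega))
    · rw [pyGetD_append_right c p _ (by omega) (by omega),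
          pyGetD_append_right c p _ (by omega) (by omega),
          pyGetD_append_right c p _ (by omega) (by omega)]
      have a1 : (c.length : Int) + i - 1 - 1 - (c.length : Int) = i - 2 := by omega
      have a2 : (c.length : Int) + i - 1 - (c.length : Int) = i - 1 := by omega
      have a3 : (c.length : Int) + i - 1 + 1 - (c.length : Int) = i := by omega
      rw [a1, a2, a3]
      exact hsum

-- the head of sorted(pool) is min(pool), and the tail is sorted(pool.erase min)
theorem sorted_cons_min (pool : List Int) (m : Int)
    (hm : PySem.List.min? pool (fun x => x) = some m) :
    PySem.List.sorted pool (fun x => x) = m :: PySem.List.sorted (pool.erase m) (fun x => x) := by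
  have hmem : m ∈ pool := PySem.List.min?_mem hm
  refine PySem.List.sorted_id_eq_of_perm_of_pairwise _ _ ?_ ?_
  · exact ((PySem.List.sorted_perm _ _ _).cons m).trans (List.perm_cons_erase hmem).symm
  · rw [List.pairwise_cons]
    constructor
    · intro y hy
      have : y ∈ pool.erase m := (PySem.List.mem_sorted _ _ _ _).mp hy
      exact PySem.List.min?_isMin hm y (List.mem_of_mem_erase this)
    · exact PySem.List.sorted_pairwise _ _

-- B's extraction loop is the window scan over the sorted pool
theorem solLoop_eq_winScan (pool : List Int) (a b : Option Int) :
    solLoop pool a b = winScan a b (PySem.List.sorted pool (fun x => x)) := by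
  induction hn : pool.length using Nat.strong_induction_on generalizing pool a b with
  | _ n ih =>
  unfold solLoop
  split
  · next hm =>
    have hnil : pool = [] := (PySem.List.min?_eq_none_iff pool _).mp hm
    subst hnil
    rfl
  · next m hm =>
    have hmem : m ∈ pool := PySem.List.min?_mem hm
    split
    · next hr =>
      rw [PySem.List.remove?_eq_some_erase pool m hmem] at hr
      exact absurd hr (by simp)
    · next pool' hr =>
      rw [PySem.List.remove?_eq_some_erase pool m hmem] at hr
      have he : pool' = pool.erase m := (Option.some.inj hr).symm
      subst he
      have hlen : (pool.erase m).length < n := by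
        have := List.length_erase_of_mem hmem
        have hp : 0 < pool.length := List.length_pos_of_mem hmem
        omega
      have hrec : ∀ a' b' : Option Int,
          solLoop (pool.erase m) a' b' = winScan a' b' (PySem.List.sorted (pool.erase m) (fun x => x)) :=
        fun a' b' => ih (pool.erase m).length hlen _ a' b' rfl
      rw [sorted_cons_min pool m hm]
      cases a with
      | none => simp only [winScan, hrec]
      | some av =>
        cases b with
        | none => simp only [winScan, hrec]
        | some bv => simp only [winScan, hrec]

-- window scan started with two registers = structural adjacent-triple search
theorem winScan_two (r : List Int) (x y : Int) :
    winScan (some x) (some y) r = (if anyT (x :: y :: r) then 1 else 0) := by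
  induction r generalizing x y with
  | nil => simp [winScan, anyT]
  | cons m rest ih =>
    simp only [winScan, anyT, ih]
    by_cases h : x + y > m <;> simp [h]

theorem winScan_eq_anyT (p : List Int) :
    winScan none none p = (if anyT p then 1 else 0) := by
  match p with
  | [] => simp [winScan, anyT]
  | [x] => simp [winScan, anyT]
  | x :: y :: r =>
    simp only [winScan]
    exact winScan_two r x y

-- structural search ↔ an index witness
theorem anyT_iff (p : List Int) :
    anyT p = true ↔ ∃ i : Nat, ∃ h : i + 2 < p.length,
      p[i]'(by omega) + p[i+1]'(by omega) > p[i+2]'h := by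
  match p with
  | [] => simp [anyT]
  | [a] => simp [anyT]
  | [a, b] => simp [anyT]
  | a :: b :: c :: r =>
    rw [show anyT (a :: b :: c :: r) = (decide (a + b > c) || anyT (b :: c :: r)) from rfl]
    rw [Bool.or_eq_true, decide_eq_true_eq, anyT_iff (b :: c :: r)]
    constructor
    · rintro (h | ⟨i, hi, h⟩)
      · exact ⟨0, by simp, by simpa using h⟩
      · exact ⟨i + 1, by simpa using Nat.succ_lt_succ hi, by simpa using h⟩
    · rintro ⟨i, hi, h⟩
      match i with
      | 0 => left; simpa using h
      | Nat.succ j =>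
        right
        exact ⟨j, by simpa using Nat.lt_of_succ_lt_succ hi, by simpa using h⟩

-- the indexed any over the positive block equals the structural search
theorem any_idx_eq_anyT (p : List Int) :
    (PySem.List.pyRange 2 ((p.length : Int))).any (fun i =>
      decide (PySem.List.pyGetD p (i - 2) 0 + PySem.List.pyGetD p (i - 1) 0 > PySem.List.pyGetD p i 0))
    = anyT p := by
  rw [Bool.eq_iff_iff, anyT_iff]
  simp only [List.any_eq_true, PySem.List.mem_pyRange_one, decide_eq_true_eq]
  constructor
  · rintro ⟨i, ⟨hi1, hi2⟩, h⟩
    refine ⟨(i - 2).toNat, by omega, ?_⟩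
    rw [PySem.List.pyGetD_eq_getElem p 0 (by omega) (by omega),
        PySem.List.pyGetD_eq_getElem p 0 (by omega) (by omega),
        PySem.List.pyGetD_eq_getElem p 0 (by omega) (by omega)] at h
    convert h using 3 <;> omega
  · rintro ⟨j, hj, h⟩
    refine ⟨(j : Int) + 2, ⟨by omega, by omega⟩, ?_⟩
    rw [PySem.List.pyGetD_eq_getElem p 0 (by omega) (by omega),
        PySem.List.pyGetD_eq_getElem p 0 (by omega) (by omega),
        PySem.List.pyGetD_eq_getElem p 0 (by omega) (by omega)]
    convert h using 3 <;> omega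

-- ===== VERDICT (by name: the statement is the Claim_ definition above) =====
theorem solution_spec : Claim_equal_solution := by
  intro A _
  unfold Spec_solution solution solution_alt
  set s := PySem.List.sorted A (fun x => x) with hs
  set c := s.filter (fun x => decide (x ≤ 0)) with hcdef
  have hsplit : s = c ++ s.filter (fun x => decide (0 < x)) :=
    sorted_split s (PySem.List.sorted_pairwise A (fun x => x))
  have hpdef : PySem.List.sorted (A.filter (fun x => decide (0 < x))) (fun x => x)
      = s.filter (fun x => decide (0 < x)) := by
    refine PySem.List.sorted_id_eq_of_perm_of_pairwise _ _ ?_ ?_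
    · exact (PySem.List.sorted_perm A (fun x => x) false).filter _
    · exact (PySem.List.sorted_pairwise A (fun x => x)).filter _
  rw [solLoop_eq_winScan, hpdef]
  set p := s.filter (fun x => decide (0 < x)) with hpdef2
  have hc : ∀ x ∈ c, x ≤ 0 := by
    intro x hx
    have := List.of_mem_filter hx
    simpa using this
  have hp : ∀ x ∈ p, 0 < x := by
    intro x hx
    have := List.of_mem_filter hx
    simpa using this
  have hlen : (A.length : Int) = (c.length : Int) + (p.length : Int) := by
    have : s.length = A.length := PySem.List.length_sorted A (fun x => x) false
    rw [hsplit] at this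
    simp at this
    omega
  rw [winScan_eq_anyT, ← any_idx_eq_anyT]
  by_cases hN : (A.length : Int) < 3
  · simp only [if_pos hN]
    have hM : (p.length : Int) ≤ 2 := by omega
    rw [PySem.List.pyRange_one_eq_nil hM]
    simp
  · simp only [if_neg hN]
    rw [solGoA_eq_any, hsplit, hlen, any_equiv c p hc hp]
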